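-- pv_equiv track=rewrite | github.com/VladMerk/yandex_praktikum_algo | sprint_4/competition.py | determine_max_rounds_draw
-- ===== SOURCE A (Python) =====
-- def determine_max_rounds_draw(rounds):
--     def _hash(num):
--         if num == "0":
--             return -1
--         return 1
--
--     score = 0
--     scores = {0: [-1]}
--     max_score = 0
--     for index, lap in enumerate(rounds.split()):
--         score += _hash(lap)
--         scores[score] = scores.get(score, []) + [index]
--         if len(scores[score]) > 2:
--             scores[score] = [scores[score][0], scores[score][-1]]
--         if len(scores[score]) == 2:
--             size = scores[score][-1] - scores[score][0]
--             if max_score < size: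
--                 max_score = size
--     return max_score
-- ===== SOURCE B (Python) =====
-- def determine_max_rounds_draw(rounds):
--     p = [0]
--     for lap in rounds.split():
--         p.append(p[-1] + (-1 if lap == "0" else 1))
--     best = 0
--     for i in range(len(p)):
--         for j in range(i + 1, len(p)):
--             if p[i] == p[j] and j - i > best:
--                 best = j - i
--     return best
-- ===== Notes on version B (the rewrite author's own statement) =====
-- stated objective: simpler
-- what changed: Replaces A's single-pass dictionary of first/last index lists (with the >2 trimming step) by a plain prefix-sum list followed by an all-pairs scan for equal prefix sums, trading A's O(n) time for a much plainer quadratic double loop.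
import Mathlib
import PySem

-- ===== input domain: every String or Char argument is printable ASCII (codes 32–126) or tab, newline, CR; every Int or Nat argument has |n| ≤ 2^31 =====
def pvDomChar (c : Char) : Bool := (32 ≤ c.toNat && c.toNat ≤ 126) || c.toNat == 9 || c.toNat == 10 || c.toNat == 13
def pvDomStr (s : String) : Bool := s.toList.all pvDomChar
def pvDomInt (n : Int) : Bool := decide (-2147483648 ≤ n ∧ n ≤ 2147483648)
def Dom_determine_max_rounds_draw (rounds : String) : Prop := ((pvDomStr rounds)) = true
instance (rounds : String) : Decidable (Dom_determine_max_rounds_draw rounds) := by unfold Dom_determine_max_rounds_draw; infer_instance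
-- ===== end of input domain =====

-- B replaces A's one-pass first/last-index dictionary with a plain prefix-sum list and an
-- all-pairs scan (simpler to read; quadratic instead of linear — no speed claim).

-- ===== PORT A =====
-- inner helper _hash of A
def determine_max_rounds_draw_hash (num : String) : Int :=
  if num == "0" then -1 else 1

-- the body of A's 'for index, lap in enumerate(...)' loop; state = (score, scores, max_score)
def pvStepA (st : Int × PySem.Dict Int (List Int) × Int) (p : Int × String) :
    Int × PySem.Dict Int (List Int) × Int :=
  let score := st.1 + determine_max_rounds_draw_hash p.2
  let scores := st.2.1.insert score (st.2.1.getD score [] ++ [p.1])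
  let scores := if PySem.List.len (scores.getD score []) > 2
    then scores.insert score
      [PySem.List.pyGetD (scores.getD score []) 0 0, PySem.List.pyGetD (scores.getD score []) (-1) 0]
    else scores
  let max_score := if PySem.List.len (scores.getD score []) = 2 then
      let size := PySem.List.pyGetD (scores.getD score []) (-1) 0 -
                  PySem.List.pyGetD (scores.getD score []) 0 0
      if st.2.2 < size then size else st.2.2
    else st.2.2
  (score, scores, max_score)

def determine_max_rounds_draw (rounds : String) : Int :=
  ((PySem.List.enumerate (PySem.Str.split₀ rounds)).foldl pvStepA
    (0, PySem.Dict.ofList [((0 : Int), [(-1 : Int)])], 0)).2.2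

-- ===== PORT B =====
-- loop body of 'for lap in rounds.split(): p.append(p[-1] + (-1 if lap == "0" else 1))'
def pvStepP (acc : List Int) (lap : String) : List Int :=
  acc ++ [PySem.List.pyGetD acc (-1) 0 + (if lap == "0" then -1 else 1)]

-- inner loop 'for j in range(i + 1, len(p)): …'
def pvInner (p : List Int) (i : Int) (best : Int) : Int :=
  (PySem.List.pyRange (i + 1) (PySem.List.len p)).foldl
    (fun best j =>
      if PySem.List.pyGetD p i 0 = PySem.List.pyGetD p j 0 ∧ j - i > best then j - i else best)
    best

def determine_max_rounds_draw_alt (rounds : String) : Int :=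
  let p := (PySem.Str.split₀ rounds).foldl pvStepP [0]
  (PySem.List.pyRange 0 (PySem.List.len p)).foldl (fun best i => pvInner p i best) 0

-- ===== PRECONDITION & SPEC =====
def Spec_determine_max_rounds_draw (rounds : String) (out : Int) : Prop := out = determine_max_rounds_draw_alt rounds
instance (rounds : String) (out : Int) : Decidable (Spec_determine_max_rounds_draw rounds out) := by unfold Spec_determine_max_rounds_draw; infer_instance

-- ===== CLAIM (what is proved, stated in full; the proofs are below) =====
def Claim_equal_determine_max_rounds_draw : Prop := ∀ (rounds : String), Dom_determine_max_rounds_draw rounds → Spec_determine_max_rounds_draw rounds (determine_max_rounds_draw rounds)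

-- ===== LEMMAS AND PROOFS =====

-- spec-level vocabulary: vs = token values, pvPre = prefix sums, pvOcc v k = positions
-- i ≤ k with prefix sum v (in increasing order), pvShape = the list A's dict stores,
-- pvM k = A's max_score after k tokens.
def pvPre (vs : List Int) (i : Nat) : Int := (vs.take i).sum

def pvOcc (vs : List Int) (v : Int) (k : Nat) : List Nat :=
  (List.range (k + 1)).filter (fun i => pvPre vs i == v)

def pvShape (l : List Nat) : List Int :=
  match l with
  | [] => []
  | f :: rest =>
    if rest.isEmpty then [(f : Int) - 1] else [(f : Int) - 1, (rest.getLastD f : Int) - 1]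

def pvMval (vs : List Int) (j : Nat) : Int :=
  (j : Int) - ((pvOcc vs (pvPre vs j) j).headD j : Int)

def pvM (vs : List Int) (k : Nat) : Int :=
  (List.range k).foldl (fun m t => if m < pvMval vs (t + 1) then pvMval vs (t + 1) else m) 0

-- generic facts about max-accumulating folds
lemma pvFold_mono {β : Type} (g : Int → β → Int) (h : ∀ b x, b ≤ g b x) :
    ∀ (xs : List β) (b : Int), b ≤ xs.foldl g b := by
  intro xs
  induction xs with
  | nil => intro b; simp
  | cons x xs ih => intro b; exact le_trans (h b x) (ih (g b x))

lemma pvFold_attains {β : Type} (g : Int → β → Int) (h : ∀ b x, b ≤ g b x)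
    (v : Int) (x : β) (hv : ∀ b, v ≤ g b x) :
    ∀ (xs : List β) (b : Int), x ∈ xs → v ≤ xs.foldl g b := by
  intro xs
  induction xs with
  | nil => intro b hb; simp at hb
  | cons y ys ih =>
    intro b hb
    rcases List.mem_cons.mp hb with h1 | h2
    · subst h1; simpa [List.foldl_cons] using le_trans (hv b) (pvFold_mono g h ys _)
    · exact ih _ h2

lemma pvFold_pres {β : Type} (g : Int → β → Int) (P : Int → Prop) :
    ∀ (xs : List β) (b : Int), (∀ b x, x ∈ xs → P b → P (g b x)) → P b → P (xs.foldl g b) := by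
  intro xs
  induction xs with
  | nil => intro b _ hb; simpa using hb
  | cons y ys ih =>
    intro b hstep hb
    exact ih _ (fun b' x hx => hstep b' x (List.mem_cons_of_mem _ hx))
      (hstep b y (List.mem_cons_self) hb)

-- prefix sums
lemma pvPre_zero (vs : List Int) : pvPre vs 0 = 0 := by simp [pvPre]

lemma pvPre_succ (vs : List Int) (k : Nat) (h : k < vs.length) :
    pvPre vs (k + 1) = pvPre vs k + vs[k] := by
  exact List.sum_take_succ vs k h

-- occurrence lists
lemma pvOcc_succ (vs : List Int) (v : Int) (k : Nat) :
    pvOcc vs v (k + 1) = pvOcc vs v k ++ if pvPre vs (k + 1) == v then [k + 1] else [] := by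
  unfold pvOcc
  rw [show k + 1 + 1 = k + 2 from rfl, List.range_succ, List.filter_append]
  by_cases h : pvPre vs (k + 1) == v <;> simp [List.filter, h]

lemma pvMem_occ {vs : List Int} {v : Int} {k i : Nat} :
    i ∈ pvOcc vs v k ↔ i ≤ k ∧ pvPre vs i = v := by
  simp only [pvOcc, List.mem_filter, List.mem_range, beq_iff_eq]
  constructor
  · rintro ⟨h1, h2⟩; exact ⟨by omega, h2⟩
  · rintro ⟨h1, h2⟩; exact ⟨by omega, h2⟩

lemma pvOcc_sorted (vs : List Int) (v : Int) (k : Nat) :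
    (pvOcc vs v k).Pairwise (· < ·) :=
  List.pairwise_lt_range.filter _

lemma pvHead_le {l : List Nat} (hs : l.Pairwise (· < ·)) {x : Nat} (hx : x ∈ l) (d : Nat) :
    l.headD d ≤ x := by
  cases l with
  | nil => simp at hx
  | cons h t =>
    rcases List.mem_cons.mp hx with h1 | h2
    · simp [h1]
    · exact le_of_lt ((List.pairwise_cons.mp hs).1 x h2)

lemma pvHeadD_mem {l : List Nat} (h : l ≠ []) (d : Nat) : l.headD d ∈ l := by
  cases l with
  | nil => exact absurd rfl h
  | cons a t => simp

lemma pvSelf_mem_occ (vs : List Int) (j : Nat) : j ∈ pvOcc vs (pvPre vs j) j :=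
  pvMem_occ.mpr ⟨le_refl j, rfl⟩

lemma pvOcc_ne_nil (vs : List Int) (j : Nat) : pvOcc vs (pvPre vs j) j ≠ [] :=
  List.ne_nil_of_mem (pvSelf_mem_occ vs j)

lemma pvHead_le_self (vs : List Int) (j : Nat) :
    (pvOcc vs (pvPre vs j) j).headD j ≤ j :=
  pvHead_le (pvOcc_sorted vs _ j) (pvSelf_mem_occ vs j) j

lemma pvMval_nonneg (vs : List Int) (j : Nat) : 0 ≤ pvMval vs j := by
  have := pvHead_le_self vs j
  unfold pvMval
  omega

-- pvM facts
lemma pvM_succ (vs : List Int) (k : Nat) :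
    pvM vs (k + 1) = if pvM vs k < pvMval vs (k + 1) then pvMval vs (k + 1) else pvM vs k := by
  simp [pvM, List.range_succ]

lemma pvM_nonneg (vs : List Int) (k : Nat) : 0 ≤ pvM vs k := by
  apply pvFold_mono
  intro b t
  dsimp only
  split <;> omega

lemma pvM_ge (vs : List Int) {t k : Nat} (h : t < k) : pvMval vs (t + 1) ≤ pvM vs k := by
  apply pvFold_attains _ _ _ t _ _ _ (List.mem_range.mpr h)
  · intro b x; dsimp only; split <;> omega
  · intro b; dsimp only; split <;> omega

lemma pvM_cases (vs : List Int) (k : Nat) :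
    pvM vs k = 0 ∨ ∃ t, t < k ∧ pvM vs k = pvMval vs (t + 1) := by
  apply pvFold_pres _ (fun r => r = 0 ∨ ∃ t, t < k ∧ r = pvMval vs (t + 1))
  · intro b x hx _
    dsimp only
    split
    · exact Or.inr ⟨x, List.mem_range.mp hx, rfl⟩
    · assumption
  · exact Or.inl rfl

-- B's prefix list is scanl
lemma pvScan_foldl :
    ∀ (ts : List String) (acc : List Int) (a : Int),
      ts.foldl pvStepP (acc ++ [a]) =
        acc ++ List.scanl (· + ·) a (ts.map determine_max_rounds_draw_hash) := by
  intro ts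
  induction ts with
  | nil => intro acc a; simp [List.scanl]
  | cons t ts ih =>
    intro acc a
    have hstep : pvStepP (acc ++ [a]) t = (acc ++ [a]) ++ [a + determine_max_rounds_draw_hash t] := by
      simp [pvStepP, determine_max_rounds_draw_hash, PySem.List.pyGetD_neg_one_append_singleton]
    rw [List.foldl_cons, hstep, ih, List.map_cons, List.scanl_cons]
    simp

lemma pvScanl_getElem :
    ∀ (vs : List Int) (s : Int) (i : Nat) (h : i < (List.scanl (· + ·) s vs).length),
      (List.scanl (· + ·) s vs)[i] = s + pvPre vs i := by
  intro vs
  induction vs with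
  | nil =>
    intro s i h
    simp [List.scanl] at h ⊢
    simp [h, pvPre]
  | cons v vs ih =>
    intro s i h
    cases i with
    | zero => simp [List.scanl_cons, pvPre]
    | succ i =>
      have h' : i < (List.scanl (· + ·) (s + v) vs).length := by
        rw [List.scanl_cons] at h; simpa using h
      have : (List.scanl (· + ·) s (v :: vs))[i + 1] =
          (List.scanl (· + ·) (s + v) vs)[i] := by
        simp [List.scanl_cons]
      rw [this, ih (s + v) i h']
      simp [pvPre, List.take_succ_cons, add_assoc]

-- A's loop invariant
lemma pvALoop (tokens : List String) :
    ∀ (rest : List String) (k : Nat) (d : PySem.Dict Int (List Int)) (m : Int),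
      List.drop k tokens = rest → k + rest.length = tokens.length →
      (∀ v, d.getD v [] = pvShape (pvOcc (tokens.map determine_max_rounds_draw_hash) v k)) →
      0 ≤ m → m = pvM (tokens.map determine_max_rounds_draw_hash) k →
      ((PySem.List.enumerate rest (k : Int)).foldl pvStepA
          (pvPre (tokens.map determine_max_rounds_draw_hash) k, d, m)).2.2
        = pvM (tokens.map determine_max_rounds_draw_hash) tokens.length := by
  set vs := tokens.map determine_max_rounds_draw_hash with hvs
  intro rest
  induction rest with
  | nil =>
    intro k d m hd hk hdict hm0 hm
    have hkn : k = tokens.length := by simpa using hk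
    subst hkn
    simpa [PySem.List.enumerate] using hm
  | cons x rs ih =>
    intro k d m hd hk hdict hm0 hm
    have hklen : k < tokens.length := by
      simp only [List.length_cons] at hk; omega
    have hkvs : k < vs.length := by simpa [hvs] using hklen
    have hdrop := List.drop_eq_getElem_cons hklen
    rw [hd] at hdrop
    have hx : tokens[k] = x := (List.cons_eq_cons.mp hdrop.symm).1
    have hrs : List.drop (k + 1) tokens = rs := (List.cons_eq_cons.mp hdrop.symm).2
    have hvk : vs[k] = determine_max_rounds_draw_hash x := by
      simp [hvs, hx]
    have hpre1 : pvPre vs (k + 1) = pvPre vs k + determine_max_rounds_draw_hash x := by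
      rw [pvPre_succ vs k hkvs, hvk]
    set v := pvPre vs (k + 1) with hv
    have hbt : (v == v) = true := beq_self_eq_true v
    rw [PySem.List.enumerate_cons, List.foldl_cons,
      show (k : Int) + 1 = ((k + 1 : Nat) : Int) from by push_cast; ring]
    have hold : d.getD v [] = pvShape (pvOcc vs v k) := hdict v
    rcases hoc : pvOcc vs v k with _ | ⟨f, rest2⟩
    · -- v unseen so far: entry becomes [k], max unchanged
      have hshape : d.getD v [] = [] := by rw [hold, hoc]; rfl
      have hstep : pvStepA (pvPre vs k, d, m) ((k : Int), x) =
          (v, d.insert v [(k : Int)], m) := by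
        simp only [pvStepA, ← hpre1]
        rw [hshape]
        simp [PySem.List.len_eq, PySem.Dict.getD_insert_self]
      rw [hstep]
      have hocc1 : pvOcc vs v (k + 1) = [k + 1] := by
        rw [pvOcc_succ, hoc, ← hv, hbt]
        simp
      apply ih (k + 1) _ m hrs (by simp only [List.length_cons] at hk; omega) _ hm0
      · -- max_score invariant
        rw [hm, pvM_succ]
        have hmval : pvMval vs (k + 1) = 0 := by
          unfold pvMval
          rw [← hv, hocc1]
          simp
        rw [hmval]
        have := pvM_nonneg vs k
        split_ifs with hlt
        · omega
        · rfl
      · -- dict invariant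
        intro w
        by_cases hw : w = v
        · subst hw
          rw [PySem.Dict.getD_insert_self, hocc1]
          simp only [pvShape, List.isEmpty_nil]
          norm_num
        · rw [PySem.Dict.getD_insert_of_ne _ _ _ hw, hdict w, pvOcc_succ]
          have : (pvPre vs (k + 1) == w) = false := by
            simp [← hv, Ne.symm hw]
          simp [this]
    · -- v seen before, first occurrence f: entry becomes [f-1, k], max updated
      have hocc1 : pvOcc vs v (k + 1) = f :: (rest2 ++ [k + 1]) := by
        rw [pvOcc_succ, hoc, ← hv, hbt]
        simp
      obtain ⟨d', hstep, hdw⟩ :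
          ∃ d', pvStepA (pvPre vs k, d, m) ((k : Int), x) =
              (v, d', if m < (k : Int) - ((f : Int) - 1) then (k : Int) - ((f : Int) - 1) else m)
            ∧ (∀ w, d'.getD w [] =
                if w = v then [(f : Int) - 1, (k : Int)] else d.getD w []) := by
        cases rest2 with
        | nil =>
          have hshape : d.getD v [] = [(f : Int) - 1] := by
            rw [hold, hoc]; rfl
          refine ⟨d.insert v [(f : Int) - 1, (k : Int)], ?_, ?_⟩
          · simp only [pvStepA, ← hpre1]
            rw [hshape]
            have hgneg : PySem.List.pyGetD [(f : Int) - 1, (k : Int)] (-1) 0 = (k : Int) := by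
              rw [show [(f : Int) - 1, (k : Int)] = [(f : Int) - 1] ++ [(k : Int)] from rfl,
                PySem.List.pyGetD_neg_one_append_singleton]
            simp [PySem.List.len_eq, PySem.Dict.getD_insert_self, hgneg,
              PySem.List.pyGetD_zero_cons]
          · intro w
            by_cases hw : w = v
            · subst hw; simp [PySem.Dict.getD_insert_self]
            · simp [PySem.Dict.getD_insert_of_ne _ _ _ hw, hw]
        | cons r t =>
          obtain ⟨b, hshape⟩ : ∃ b, d.getD v [] = [(f : Int) - 1, b] := by
            refine ⟨(((r :: t).getLastD f : Nat) : Int) - 1, ?_⟩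
            rw [hold, hoc]
            simp [pvShape]
          refine ⟨(d.insert v ([(f : Int) - 1, b] ++ [(k : Int)])).insert v
              [(f : Int) - 1, (k : Int)], ?_, ?_⟩
          · have h3 : PySem.List.pyGetD ([(f : Int) - 1, b] ++ [(k : Int)]) (-1) 0 = (k : Int) :=
              PySem.List.pyGetD_neg_one_append_singleton _ _ _
            have h3' : PySem.List.pyGetD [(f : Int) - 1, b, (k : Int)] (-1) 0 = (k : Int) := h3
            have h4 : PySem.List.pyGetD [(f : Int) - 1, (k : Int)] (-1) 0 = (k : Int) :=
              PySem.List.pyGetD_neg_one_append_singleton [(f : Int) - 1] _ _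
            simp only [pvStepA, ← hpre1]
            rw [hshape]
            simp [PySem.List.len_eq, PySem.Dict.getD_insert_self, h3', h4,
              PySem.List.pyGetD_zero_cons]
          · intro w
            by_cases hw : w = v
            · subst hw; simp [PySem.Dict.getD_insert_self]
            · simp [PySem.Dict.getD_insert_of_ne _ _ _ hw, hw]
      rw [hstep]
      have hfk : f ≤ k := by
        have := (pvMem_occ.mp (by rw [hoc]; exact List.mem_cons_self)).1
        omega
      have hsz : (k : Int) - ((f : Int) - 1) = pvMval vs (k + 1) := by
        unfold pvMval
        rw [← hv, hocc1]
        simp only [List.headD_cons]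
        push_cast
        ring
      rw [hsz]
      apply ih (k + 1) _ _ hrs (by simp only [List.length_cons] at hk; omega)
      · -- dict invariant
        intro w
        rw [hdw w]
        by_cases hw : w = v
        · subst hw
          rw [if_pos rfl, hocc1]
          have hne : (rest2 ++ [k + 1]).isEmpty = false := by simp
          simp only [pvShape, hne, Bool.false_eq_true, if_false, List.getLastD_concat]
          push_cast
          simp
        · rw [if_neg hw, hdict w, pvOcc_succ]
          have : (pvPre vs (k + 1) == w) = false := by
            simp [← hv, Ne.symm hw]
          simp [this]
      · -- 0 ≤ new max
        have := pvMval_nonneg vs (k + 1)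
        split_ifs <;> omega
      · -- max invariant
        rw [hm, pvM_succ]


lemma pvDict_init (vs : List Int) (v : Int) :
    (PySem.Dict.ofList [((0 : Int), [(-1 : Int)])]).getD v [] =
      pvShape (pvOcc vs v 0) := by
  have hof : PySem.Dict.ofList [((0 : Int), [(-1 : Int)])] =
      PySem.Dict.empty.insert 0 [-1] := rfl
  have hocc : pvOcc vs v 0 = if (0 : Int) == v then [0] else [] := by
    cases hbv : ((0 : Int) == v) <;> simp [pvOcc, List.filter, pvPre_zero, hbv]
  by_cases hv : v = 0
  · subst hv
    rw [hof, PySem.Dict.getD_insert_self]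
    simp [hocc, pvShape]
  · rw [hof, PySem.Dict.getD_insert_of_ne _ _ _ hv, PySem.Dict.getD_empty]
    have : ((0 : Int) == v) = false := by simp [Ne.symm hv]
    simp [hocc, this, pvShape]

lemma pvA_eq (rounds : String) :
    determine_max_rounds_draw rounds =
      pvM ((PySem.Str.split₀ rounds).map determine_max_rounds_draw_hash)
        (PySem.Str.split₀ rounds).length := by
  have h := pvALoop (PySem.Str.split₀ rounds) (PySem.Str.split₀ rounds) 0
    (PySem.Dict.ofList [((0 : Int), [(-1 : Int)])]) 0 rfl (by simp)
    (fun v => pvDict_init _ v) (le_refl 0) (by simp [pvM])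
  unfold determine_max_rounds_draw
  rw [← h]
  norm_num [pvPre_zero]

lemma pvInner_step_mono (p : List Int) (i : Int) :
    ∀ (b : Int) (j : Int),
      b ≤ (if PySem.List.pyGetD p i 0 = PySem.List.pyGetD p j 0 ∧ j - i > b then j - i else b) := by
  intro b j
  split_ifs with h
  · exact le_of_lt h.2
  · exact le_refl b

lemma pvInner_mono (p : List Int) : ∀ (b : Int) (i : Int), b ≤ pvInner p i b := by
  intro b i
  unfold pvInner
  exact pvFold_mono _ (pvInner_step_mono p i) _ b

-- ===== main equivalence =====
lemma pvMain (rounds : String) :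
    determine_max_rounds_draw rounds = determine_max_rounds_draw_alt rounds := by
  have hA := pvA_eq rounds
  set tokens := PySem.Str.split₀ rounds with htok
  set vs := tokens.map determine_max_rounds_draw_hash with hvs
  set n := tokens.length with hn
  -- the prefix list of B
  have hp : tokens.foldl pvStepP [0] = List.scanl (· + ·) 0 vs := by
    simpa using pvScan_foldl tokens [] 0
  set p := List.scanl (· + ·) (0 : Int) vs with hpdef
  have hplen : p.length = n + 1 := by
    simp [hpdef, List.length_scanl, hvs, hn]
  have hlenI : PySem.List.len p = (n : Int) + 1 := by
    simp [PySem.List.len_eq, hplen]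
  have hget : ∀ i : Int, 0 ≤ i → i < (n : Int) + 1 → PySem.List.pyGetD p i 0 = pvPre vs i.toNat := by
    intro i h0 h1
    rw [PySem.List.pyGetD_eq_getElem p 0 h0 (by rw [hplen]; omega)]
    rw [pvScanl_getElem vs 0 i.toNat (by rw [← hpdef, hplen]; omega)]
    ring
  have halt : determine_max_rounds_draw_alt rounds =
      (PySem.List.pyRange 0 ((n : Int) + 1)).foldl (fun best i => pvInner p i best) 0 := by
    show (let q := tokens.foldl pvStepP [0];
      (PySem.List.pyRange 0 (PySem.List.len q)).foldl (fun best i => pvInner q i best) 0) = _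
    rw [hp]
    show (PySem.List.pyRange 0 (PySem.List.len p)).foldl (fun best i => pvInner p i best) 0 = _
    rw [hlenI]
  have hub : (PySem.List.pyRange 0 ((n : Int) + 1)).foldl (fun best i => pvInner p i best) 0
      ≤ pvM vs n := by
    apply pvFold_pres _ (fun r => r ≤ pvM vs n) _ 0 ?_ (pvM_nonneg vs n)
    intro b i hi hb
    obtain ⟨hi0, hi1⟩ := PySem.List.mem_pyRange_one.mp hi
    unfold pvInner
    apply pvFold_pres _ (fun r => r ≤ pvM vs n) _ b ?_ hb
    intro b' j hj hb'
    obtain ⟨hj0, hj1⟩ := PySem.List.mem_pyRange_one.mp hj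
    split_ifs with hc
    swap
    · exact hb'
    obtain ⟨heq, hgt⟩ := hc
    have hij : i.toNat < j.toNat := by omega
    have hjn : j.toNat ≤ n := by omega
    have hpre : pvPre vs i.toNat = pvPre vs j.toNat := by
      rw [← hget i hi0 (by omega), ← hget j (by omega) (by omega)]
      exact heq
    have hmem : i.toNat ∈ pvOcc vs (pvPre vs j.toNat) j.toNat :=
      pvMem_occ.mpr ⟨by omega, hpre⟩
    have hhead : (pvOcc vs (pvPre vs j.toNat) j.toNat).headD j.toNat ≤ i.toNat :=
      pvHead_le (pvOcc_sorted vs _ _) hmem _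
    have h1 : j - i ≤ pvMval vs j.toNat := by
      unfold pvMval
      omega
    have h2 : pvMval vs j.toNat ≤ pvM vs n := by
      have h3 := pvM_ge vs (t := j.toNat - 1) (k := n) (by omega)
      rwa [show j.toNat - 1 + 1 = j.toNat from by omega] at h3
    omega
  have hlb : pvM vs n ≤
      (PySem.List.pyRange 0 ((n : Int) + 1)).foldl (fun best i => pvInner p i best) 0 := by
    rcases pvM_cases vs n with h0 | ⟨t, ht, heq⟩
    · rw [h0]
      exact pvFold_mono _ (fun b x => pvInner_mono p b x) _ 0
    set j := t + 1 with hj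
    set f := (pvOcc vs (pvPre vs j) j).headD j with hf
    have hfj : f ≤ j := pvHead_le_self vs j
    obtain ⟨hfle, hfpre⟩ := pvMem_occ.mp (pvHeadD_mem (pvOcc_ne_nil vs j) j)
    have hmv : pvMval vs j = (j : Int) - (f : Int) := rfl
    by_cases hcase : f = j
    · rw [heq, hmv, hcase]
      simp only [sub_self]
      exact pvFold_mono _ (fun b x => pvInner_mono p b x) _ 0
    have hflt : f < j := lt_of_le_of_ne hfj hcase
    rw [heq, hmv]
    have hfeq : PySem.List.pyGetD p (f : Int) 0 = PySem.List.pyGetD p (j : Int) 0 := by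
      rw [hget (f : Int) (by omega) (by omega),
          hget (j : Int) (by omega) (by omega)]
      simp only [Int.toNat_natCast]
      exact hfpre
    apply pvFold_attains _ (fun b x => pvInner_mono p b x) _ ((f : Int)) ?_ _ 0
      (PySem.List.mem_pyRange_one.mpr ⟨by omega, by omega⟩)
    intro b
    unfold pvInner
    apply pvFold_attains _ (pvInner_step_mono p (f : Int)) _ ((j : Int)) ?_ _ b
      (PySem.List.mem_pyRange_one.mpr ⟨by omega, by omega⟩)
    intro b'
    split_ifs with h
    · exact le_refl _
    · rw [Classical.not_and_iff_not_or_not] at h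
      rcases h with h | h
      · exact absurd hfeq h
      · omega
  rw [hA, halt]
  exact le_antisymm hlb hub

-- ===== VERDICT (by name: the statement is the Claim_ definition above) =====
theorem determine_max_rounds_draw_spec : Claim_equal_determine_max_rounds_draw := by
  intro rounds _
  unfold Spec_determine_max_rounds_draw
  exact pvMain rounds
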